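-- pv_equiv track=rewrite | github.com/rtsoliday/medm | tests/testADL_SaveFiles.py | strip_default_width_for_widgets
-- ===== SOURCE A (Python) =====
-- def _strip_default_width_from_block(block_lines: list[str]) -> list[str]:
--   """Return block lines omitting width=1 entries inside basic attribute."""
--   result: list[str] = []
--   inside_basic = False
--   basic_depth = 0
--
--   for line in block_lines:
--     stripped = line.strip()
--     if not inside_basic and stripped.startswith('"basic attribute"'):
--       inside_basic = True
--       basic_depth = line.count("{") - line.count("}")
--       result.append(line)
--       if basic_depth <= 0:
--         inside_basic = False
--       continue
--
--     if inside_basic: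
--       if stripped != "width=1":
--         result.append(line)
--       basic_depth += line.count("{") - line.count("}")
--       if basic_depth <= 0:
--         inside_basic = False
--       continue
--
--     result.append(line)
--
--   return result
--
-- def strip_default_width_for_widgets(
--     lines: list[str], widget_names: tuple[str, ...]) -> list[str]:
--   """Remove default width=1 entries added inside specified widgets."""
--   result: list[str] = []
--   i = 0
--   while i < len(lines):
--     line = lines[i]
--     stripped = line.strip()
--     if any(stripped.startswith(name) for name in widget_names):
--       block: list[str] = []
--       depth = 0
--       while i < len(lines):
--         block_line = lines[i]
--         block.append(block_line)
--         depth += block_line.count("{") - block_line.count("}")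
--         i += 1
--         if depth <= 0:
--           break
--       result.extend(_strip_default_width_from_block(block))
--       continue
--
--     result.append(line)
--     i += 1
--
--   return result
-- ===== SOURCE B (Python) =====
-- def strip_default_width_for_widgets(
--     lines: list[str], widget_names: tuple[str, ...]) -> list[str]:
--   """Remove default width=1 entries added inside specified widgets.
--
--   Single linear pass carrying the block/basic-attribute state directly,
--   instead of collecting each widget block and re-scanning it.
--   """
--   result: list[str] = []
--   in_widget = False
--   widget_depth = 0
--   inside_basic = False
--   basic_depth = 0
--   for line in lines:
--     stripped = line.strip()
--     delta = line.count("{") - line.count("}")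
--     if not in_widget:
--       if any(stripped.startswith(name) for name in widget_names):
--         in_widget = True
--         widget_depth = 0
--         inside_basic = False
--         basic_depth = 0
--       else:
--         result.append(line)
--         continue
--     if inside_basic:
--       if stripped != "width=1":
--         result.append(line)
--       basic_depth += delta
--       if basic_depth <= 0:
--         inside_basic = False
--     elif stripped.startswith('"basic attribute"'):
--       inside_basic = True
--       basic_depth = delta
--       result.append(line)
--       if basic_depth <= 0:
--         inside_basic = False
--     else:
--       result.append(line)
--     widget_depth += delta
--     if widget_depth <= 0:
--       in_widget = False
--   return result
-- ===== Notes on version B (the rewrite author's own statement) =====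
-- stated objective: simpler
-- what changed: Replaced the two-phase design (collect each widget block into a list, then re-scan it with a helper) with a single linear pass over the lines that carries the widget-depth and basic-attribute state directly, so no intermediate block lists are built and the helper disappears.
import Mathlib
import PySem

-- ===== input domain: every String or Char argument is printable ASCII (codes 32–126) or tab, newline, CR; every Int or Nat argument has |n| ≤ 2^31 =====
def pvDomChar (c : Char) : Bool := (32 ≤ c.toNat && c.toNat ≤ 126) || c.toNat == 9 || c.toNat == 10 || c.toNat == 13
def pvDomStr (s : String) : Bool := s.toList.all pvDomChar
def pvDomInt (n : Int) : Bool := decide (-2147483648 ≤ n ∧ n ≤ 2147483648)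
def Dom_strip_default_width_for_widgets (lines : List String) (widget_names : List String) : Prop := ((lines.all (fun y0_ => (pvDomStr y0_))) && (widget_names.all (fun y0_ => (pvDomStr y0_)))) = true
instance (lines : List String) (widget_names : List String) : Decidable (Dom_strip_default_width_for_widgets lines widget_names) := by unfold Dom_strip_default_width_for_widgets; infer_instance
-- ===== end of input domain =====

-- B replaces A's two-phase design (collect each widget block, then re-scan it with a helper)
-- by one linear pass carrying the block/basic-attribute state directly (objective: simpler).

-- ===== PORT A =====
def pvDelta (line : String) : Int :=
  (PySem.Str.count line "{" : Int) - (PySem.Str.count line "}" : Int)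

-- for loop of _strip_default_width_from_block, state (inside_basic, basic_depth)
def pvStripBlockGo (insideBasic : Bool) (basicDepth : Int) : List String → List String
  | [] => []
  | line :: rest =>
    let stripped := PySem.Str.strip line
    if !insideBasic && PySem.Str.startswith stripped "\"basic attribute\"" then
      let bd := pvDelta line
      line :: pvStripBlockGo (decide (0 < bd)) bd rest
    else if insideBasic then
      let bd := basicDepth + pvDelta line
      if stripped = "width=1" then
        pvStripBlockGo (decide (0 < bd)) bd rest
      else
        line :: pvStripBlockGo (decide (0 < bd)) bd rest
    else
      line :: pvStripBlockGo insideBasic basicDepth rest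

-- inner while loop of A: collect a block, return (block, remaining lines)
def pvCollectBlock : List String → Int → List String × List String
  | [], _ => ([], [])
  | l :: rest, depth =>
    let d := depth + pvDelta l
    if d ≤ 0 then ([l], rest)
    else
      let p := pvCollectBlock rest d
      (l :: p.1, p.2)

-- termination lemma for the outer while loop of A
theorem pvCollectBlock_snd_length : ∀ (rest : List String) (l : String) (d : Int),
    (pvCollectBlock (l :: rest) d).2.length ≤ rest.length := by
  intro rest
  induction rest with
  | nil =>
    intro l d
    simp only [pvCollectBlock]
    split <;> simp
  | cons x rs ih =>
    intro l d
    simp only [pvCollectBlock]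
    split
    · simp
    · exact le_trans (ih x _) (by simp)

def pvGoA (names : List String) : List String → List String
  | [] => []
  | l :: rest =>
    let stripped := PySem.Str.strip l
    if names.any (fun name => PySem.Str.startswith stripped name) then
      let p := pvCollectBlock (l :: rest) 0
      pvStripBlockGo false 0 p.1 ++ pvGoA names p.2
    else
      l :: pvGoA names rest
  termination_by xs => xs.length
  decreasing_by
    · exact Nat.lt_succ_of_le (pvCollectBlock_snd_length rest l 0)
    · simp

def strip_default_width_for_widgets (lines : List String) (widget_names : List String) : List String :=
  pvGoA widget_names lines

-- ===== PORT B =====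
structure PvSt where
  inW : Bool
  wd : Int
  ib : Bool
  bd : Int
  acc : List String

def pvDeltaB (line : String) : Int :=
  (PySem.Str.count line "{" : Int) - (PySem.Str.count line "}" : Int)

def pvStepB (names : List String) (st : PvSt) (line : String) : PvSt :=
  let stripped := PySem.Str.strip line
  let delta := pvDeltaB line
  if !st.inW && !(names.any (fun n => PySem.Str.startswith stripped n)) then
    { st with acc := st.acc ++ [line] }
  else
    let st1 := if st.inW then st else { inW := true, wd := 0, ib := false, bd := 0, acc := st.acc }
    let st2 :=
      if st1.ib then
        { st1 with acc := if stripped = "width=1" then st1.acc else st1.acc ++ [line],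
                   ib := decide (0 < st1.bd + delta), bd := st1.bd + delta }
      else if PySem.Str.startswith stripped "\"basic attribute\"" then
        { st1 with ib := decide (0 < delta), bd := delta, acc := st1.acc ++ [line] }
      else
        { st1 with acc := st1.acc ++ [line] }
    { st2 with inW := decide (0 < st1.wd + delta), wd := st1.wd + delta }

def strip_default_width_for_widgets_alt (lines : List String) (widget_names : List String) : List String :=
  (lines.foldl (pvStepB widget_names) ⟨false, 0, false, 0, []⟩).acc

-- ===== PRECONDITION & SPEC =====
def Spec_strip_default_width_for_widgets (lines : List String) (widget_names : List String) (out : List String) : Prop := out = strip_default_width_for_widgets_alt lines widget_names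
instance (lines : List String) (widget_names : List String) (out : List String) : Decidable (Spec_strip_default_width_for_widgets lines widget_names out) := by unfold Spec_strip_default_width_for_widgets; infer_instance

-- ===== CLAIM (what is proved, stated in full; the proofs are below) =====
def Claim_equal_strip_default_width_for_widgets : Prop := ∀ (lines : List String) (widget_names : List String), Dom_strip_default_width_for_widgets lines widget_names → Spec_strip_default_width_for_widgets lines widget_names (strip_default_width_for_widgets lines widget_names)

-- ===== LEMMAS AND PROOFS =====

theorem pvDeltaB_eq (line : String) : pvDeltaB line = pvDelta line := rfl

-- B's fold over a widget block matches A's collect-then-strip, given a continuation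
-- handling the remaining lines.
theorem pv_inner (names : List String) : ∀ (xs : List String),
    (∀ r : List String, r.length < xs.length → ∀ (wd : Int) (ib' : Bool) (bd' : Int) (acc' : List String),
      (r.foldl (pvStepB names) ⟨false, wd, ib', bd', acc'⟩).acc = acc' ++ pvGoA names r) →
    ∀ (d : Int) (ib : Bool) (bd : Int) (acc : List String),
    (xs.foldl (pvStepB names) ⟨true, d, ib, bd, acc⟩).acc
      = acc ++ pvStripBlockGo ib bd (pvCollectBlock xs d).1 ++ pvGoA names (pvCollectBlock xs d).2 := by
  intro xs
  induction xs with
  | nil =>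
    intro _ d ib bd acc
    simp [pvCollectBlock, pvStripBlockGo, pvGoA]
  | cons l rest ih =>
    intro H d ib bd acc
    have H' : ∀ r : List String, r.length < rest.length → ∀ (wd : Int) (ib' : Bool) (bd' : Int) (acc' : List String),
        (r.foldl (pvStepB names) ⟨false, wd, ib', bd', acc'⟩).acc = acc' ++ pvGoA names r :=
      fun r hr => H r (Nat.lt_trans hr (Nat.lt_succ_self _))
    have Hrest := fun wd ib' bd' acc' => H rest (Nat.lt_succ_self _) wd ib' bd' acc'
    by_cases hd : d + pvDelta l ≤ 0
    · have hnot : ¬ (0 < d + pvDelta l) := by omega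
      by_cases hib : ib = true
      · subst hib
        by_cases hw : PySem.Str.strip l = "width=1"
        · simp [List.foldl_cons, pvStepB, pvDeltaB_eq, pvCollectBlock, pvStripBlockGo, hd, hnot, hw, Hrest]
        · simp [List.foldl_cons, pvStepB, pvDeltaB_eq, pvCollectBlock, pvStripBlockGo, hd, hnot, hw, Hrest]
      · have hibf : ib = false := by simpa using hib
        subst hibf
        by_cases hb : PySem.Str.startswith (PySem.Str.strip l) "\"basic attribute\"" = true
        · have hbn := hb; simp at hbn
          simp [List.foldl_cons, pvStepB, pvDeltaB_eq, pvCollectBlock, pvStripBlockGo, hd, hnot, hbn, Hrest]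
        · have hbn := hb; simp at hbn
          simp [List.foldl_cons, pvStepB, pvDeltaB_eq, pvCollectBlock, pvStripBlockGo, hd, hnot, hbn, Hrest]
    · have hpos : 0 < d + pvDelta l := by omega
      by_cases hib : ib = true
      · subst hib
        by_cases hw : PySem.Str.strip l = "width=1"
        · simp [List.foldl_cons, pvStepB, pvDeltaB_eq, pvCollectBlock, pvStripBlockGo, hd, hpos, hw, ih H']
        · simp [List.foldl_cons, pvStepB, pvDeltaB_eq, pvCollectBlock, pvStripBlockGo, hd, hpos, hw, ih H']
      · have hibf : ib = false := by simpa using hib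
        subst hibf
        by_cases hb : PySem.Str.startswith (PySem.Str.strip l) "\"basic attribute\"" = true
        · have hbn := hb; simp at hbn
          simp [List.foldl_cons, pvStepB, pvDeltaB_eq, pvCollectBlock, pvStripBlockGo, hd, hpos, hbn, ih H']
          rfl
        · have hbn := hb; simp at hbn
          simp [List.foldl_cons, pvStepB, pvDeltaB_eq, pvCollectBlock, pvStripBlockGo, hd, hpos, hbn, ih H']

theorem pv_outer (names : List String) : ∀ (n : Nat) (lines : List String), lines.length ≤ n →
    ∀ (wd : Int) (ib : Bool) (bd : Int) (acc : List String),
      (lines.foldl (pvStepB names) ⟨false, wd, ib, bd, acc⟩).acc = acc ++ pvGoA names lines := by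
  intro n
  induction n with
  | zero =>
    intro lines hlen
    have : lines = [] := List.eq_nil_of_length_eq_zero (Nat.le_zero.mp hlen)
    subst this
    intro wd ib bd acc
    simp [pvGoA]
  | succ n ihn =>
    intro lines hlen wd ib bd acc
    cases lines with
    | nil => simp [pvGoA]
    | cons l rest =>
      by_cases hmatch : (names.any fun name => PySem.Str.startswith (PySem.Str.strip l) name) = true
      · have hm := hmatch; simp at hm
        have H : ∀ r : List String, r.length < (l :: rest).length → ∀ (wd' : Int) (ib' : Bool) (bd' : Int) (acc' : List String),
            (r.foldl (pvStepB names) ⟨false, wd', ib', bd', acc'⟩).acc = acc' ++ pvGoA names r := by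
          intro r hr
          apply ihn
          simp only [List.length_cons] at hr hlen
          omega
        have key := pv_inner names (l :: rest) H 0 false 0 acc
        have hstep : pvStepB names ⟨false, wd, ib, bd, acc⟩ l = pvStepB names ⟨true, 0, false, 0, acc⟩ l := by
          simp [pvStepB, pvDeltaB_eq, hm]
        rw [List.foldl_cons, hstep, ← List.foldl_cons, key]
        simp [pvGoA, hm, List.append_assoc]
      · have hm := hmatch; simp at hm
        simp only [List.foldl_cons]
        have hstep : pvStepB names ⟨false, wd, ib, bd, acc⟩ l = ⟨false, wd, ib, bd, acc ++ [l]⟩ := by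
          simp [pvStepB]
          intro x hx hx'
          rw [hm x hx] at hx'
          exact absurd hx' (by decide)
        rw [hstep, ihn rest (by simp only [List.length_cons] at hlen; omega)]
        simp [pvGoA]
        intro x hx hx'
        rw [hm x hx] at hx'
        exact absurd hx' (by decide)

-- ===== VERDICT (by name: the statement is the Claim_ definition above) =====
theorem strip_default_width_for_widgets_spec : Claim_equal_strip_default_width_for_widgets := by
  intro lines names _
  unfold Spec_strip_default_width_for_widgets strip_default_width_for_widgets strip_default_width_for_widgets_alt
  simpa using (pv_outer names lines.length lines le_rfl 0 false 0 []).symm
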